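-- pv_equiv track=rewrite | github.com/bjeans/homelab-mcp | docker_mcp_podman.py | format_labels_output
-- ===== SOURCE A (Python) =====
-- from typing import Dict, Optional
--
-- def format_labels_output(labels: Dict, indent: str = "  ") -> str:
--     """
--     Format container labels for display, highlighting traefik and custom domain labels
--
--     Args:
--         labels: Dictionary of container labels
--         indent: Indentation string
--
--     Returns:
--         Formatted label string for display
--     """
--     if not labels:
--         return ""
--
--     output = f"{indent}Labels:\n"
--
--     # Separate and prioritize traefik labels
--     traefik_labels = {}
--     domain_labels = {}
--     other_labels = {}
--
--     for key, value in labels.items():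
--         if "traefik" in key.lower():
--             traefik_labels[key] = value
--         elif any(domain_key in key.lower() for domain_key in ["domain", "host", "url"]):
--             domain_labels[key] = value
--         else:
--             other_labels[key] = value
--
--     # Display traefik labels first
--     for key, value in traefik_labels.items():
--         output += f"{indent}  • {key}: {value}\n"
--
--     # Then domain-related labels
--     for key, value in domain_labels.items():
--         output += f"{indent}  • {key}: {value}\n"
--
--     # Then other labels (show first 5)
--     for i, (key, value) in enumerate(other_labels.items()):
--         if i < 5:
--             output += f"{indent}  • {key}: {value}\n"
--
--     if len(other_labels) > 5:
--         remaining = len(other_labels) - 5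
--         output += f"{indent}  ... and {remaining} more labels\n"
--
--     return output
-- ===== SOURCE B (Python) =====
-- def format_labels_output(labels, indent="  "):
--     """Same output as A via one stable sort by priority plus a single emit loop."""
--     if not labels:
--         return ""
--
--     def prio(key):
--         kl = key.lower()
--         if "traefik" in kl:
--             return 0
--         if "domain" in kl or "host" in kl or "url" in kl:
--             return 1
--         return 2
--
--     items = sorted(labels.items(), key=lambda kv: prio(kv[0]))
--     total_others = sum(1 for key in labels if prio(key) == 2)
--
--     output = f"{indent}Labels:\n"
--     shown = 0
--     for key, value in items:
--         if prio(key) == 2: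
--             if shown < 5:
--                 output += f"{indent}  • {key}: {value}\n"
--                 shown += 1
--         else:
--             output += f"{indent}  • {key}: {value}\n"
--
--     if total_others > 5:
--         output += f"{indent}  ... and {total_others - 5} more labels\n"
--     return output
-- ===== Notes on version B (the rewrite author's own statement) =====
-- stated objective: alternative
-- what changed: Replaces A's three category dicts and three sequential emit loops by one stable sort of the items on a 0/1/2 priority key, a separately computed count of 'other' labels, and a single emit loop with a shown-counter capped at 5; Pre_ only rules out duplicate-key association lists, which cannot arise from a Python dict.
import Mathlib
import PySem

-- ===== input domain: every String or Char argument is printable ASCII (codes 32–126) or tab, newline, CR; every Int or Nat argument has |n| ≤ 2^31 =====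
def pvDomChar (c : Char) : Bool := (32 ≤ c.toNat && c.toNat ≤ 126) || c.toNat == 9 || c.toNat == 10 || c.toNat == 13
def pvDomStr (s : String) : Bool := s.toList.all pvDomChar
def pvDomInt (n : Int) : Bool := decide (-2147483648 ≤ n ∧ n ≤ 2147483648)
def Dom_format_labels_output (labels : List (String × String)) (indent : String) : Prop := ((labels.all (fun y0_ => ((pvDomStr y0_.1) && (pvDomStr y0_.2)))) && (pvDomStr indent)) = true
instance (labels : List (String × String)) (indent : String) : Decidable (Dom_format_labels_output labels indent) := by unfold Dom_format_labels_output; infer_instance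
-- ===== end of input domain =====

-- B replaces A's three bucket dicts by one stable sort on a priority key plus a single
-- emit loop with a shown-counter (objective: alternative decomposition, same cost).

-- f"{indent}  • {key}: {value}\n" (shared formatting helper of both ports)
def pvFmtLine (indent k v : String) : String := indent ++ "  • " ++ k ++ ": " ++ v ++ "\n"

-- ===== PORT A =====
def format_labels_output (labels : List (String × String)) (indent : String) : String :=
  if labels = [] then ""
  else
    let output := indent ++ "Labels:\n"
    -- for key, value in labels.items(): put (key, value) in one of three dicts
    let buckets := labels.foldl
      (fun (s : PySem.Dict String String × PySem.Dict String String × PySem.Dict String String) kv =>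
        if PySem.Str.isIn "traefik" (PySem.Str.lower kv.1) then
          (s.1.insert kv.1 kv.2, s.2.1, s.2.2)
        else if ["domain", "host", "url"].any (fun dk => PySem.Str.isIn dk (PySem.Str.lower kv.1)) then
          (s.1, s.2.1.insert kv.1 kv.2, s.2.2)
        else
          (s.1, s.2.1, s.2.2.insert kv.1 kv.2))
      (PySem.Dict.empty, PySem.Dict.empty, PySem.Dict.empty)
    let traefik_labels := buckets.1
    let domain_labels := buckets.2.1
    let other_labels := buckets.2.2
    let output := traefik_labels.items.foldl (fun out kv => out ++ pvFmtLine indent kv.1 kv.2) output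
    let output := domain_labels.items.foldl (fun out kv => out ++ pvFmtLine indent kv.1 kv.2) output
    let output := (PySem.List.enumerate other_labels.items 0).foldl
      (fun out ikv => if ikv.1 < 5 then out ++ pvFmtLine indent ikv.2.1 ikv.2.2 else out) output
    if (other_labels.size : Int) > 5 then
      output ++ indent ++ "  ... and " ++ PySem.Int.toStr ((other_labels.size : Int) - 5) ++ " more labels\n"
    else output

-- ===== PORT B =====
-- B-side helper: the priority key
def pvPrio (key : String) : Int :=
  if PySem.Str.isIn "traefik" (PySem.Str.lower key) then 0
  else if PySem.Str.isIn "domain" (PySem.Str.lower key) || PySem.Str.isIn "host" (PySem.Str.lower key)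
       || PySem.Str.isIn "url" (PySem.Str.lower key) then 1
  else 2

def format_labels_output_alt (labels : List (String × String)) (indent : String) : String :=
  if labels = [] then ""
  else
    let items := PySem.List.sorted labels (fun kv => pvPrio kv.1) false
    let total_others : Int := labels.foldl (fun n kv => if pvPrio kv.1 = 2 then n + 1 else n) 0
    let st := items.foldl
      (fun (s : String × Int) kv =>
        if pvPrio kv.1 = 2 then
          if s.2 < 5 then (s.1 ++ pvFmtLine indent kv.1 kv.2, s.2 + 1) else s
        else (s.1 ++ pvFmtLine indent kv.1 kv.2, s.2))
      (indent ++ "Labels:\n", 0)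
    if total_others > 5 then
      st.1 ++ indent ++ "  ... and " ++ PySem.Int.toStr (total_others - 5) ++ " more labels\n"
    else st.1

-- ===== PRECONDITION & SPEC =====
-- Pre_ excludes association lists with duplicate keys: they cannot arise from a Python
-- dict (duplicates collapse before A ever runs), so the ports' behaviour there is unspecified.
def Pre_format_labels_output (labels : List (String × String)) (indent : String) : Prop :=
  (labels.map Prod.fst).Nodup
instance (labels : List (String × String)) (indent : String) : Decidable (Pre_format_labels_output labels indent) := by unfold Pre_format_labels_output; infer_instance

def pvWitness_format_labels_output : (List (String × String)) × String :=
  ([("traefik.http.port", "80"), ("my.domain", "x.io"), ("app", "web")], "  ")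

def Spec_format_labels_output (labels : List (String × String)) (indent : String) (out : String) : Prop := out = format_labels_output_alt labels indent
instance (labels : List (String × String)) (indent : String) (out : String) : Decidable (Spec_format_labels_output labels indent out) := by unfold Spec_format_labels_output; infer_instance

-- ===== CLAIM (what is proved, stated in full; the proofs are below) =====
def Claim_equal_format_labels_output : Prop := ∀ (labels : List (String × String)) (indent : String), Dom_format_labels_output labels indent → Pre_format_labels_output labels indent → Spec_format_labels_output labels indent (format_labels_output labels indent)

-- ===== LEMMAS AND PROOFS =====

theorem format_labels_output_witness_ok :
    Dom_format_labels_output (pvWitness_format_labels_output.1) (pvWitness_format_labels_output.2) ∧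
    Pre_format_labels_output (pvWitness_format_labels_output.1) (pvWitness_format_labels_output.2) := by
  constructor <;> decide

-- the lines "• key: value\n" for a list of pairs, concatenated
def pvLines (indent : String) : List (String × String) → String
  | [] => ""
  | kv :: t => pvFmtLine indent kv.1 kv.2 ++ pvLines indent t

theorem pvLines_append (indent : String) (a b : List (String × String)) :
    pvLines indent (a ++ b) = pvLines indent a ++ pvLines indent b := by
  induction a with
  | nil => simp [pvLines]
  | cons kv t ih => simp [pvLines, ih, String.append_assoc]

theorem pvPrio_cases (k : String) : pvPrio k = 0 ∨ pvPrio k = 1 ∨ pvPrio k = 2 := by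
  unfold pvPrio; split_ifs <;> simp

theorem pvPrio_zero_of (k : String)
    (hT : PySem.Str.isIn "traefik" (PySem.Str.lower k) = true) : pvPrio k = 0 := by
  unfold pvPrio; rw [if_pos hT]

theorem pvPrio_one_of (k : String)
    (hT : ¬ PySem.Str.isIn "traefik" (PySem.Str.lower k) = true)
    (hD : ["domain", "host", "url"].any (fun dk => PySem.Str.isIn dk (PySem.Str.lower k)) = true) :
    pvPrio k = 1 := by
  simp only [List.any_cons, List.any_nil, Bool.or_false] at hD
  unfold pvPrio
  rw [if_neg hT, if_pos]
  rcases Bool.or_eq_true_iff.mp hD with h | hrest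
  · rw [h]; simp
  · rcases Bool.or_eq_true_iff.mp hrest with h | h <;> rw [h] <;> simp

theorem pvPrio_two_of (k : String)
    (hT : ¬ PySem.Str.isIn "traefik" (PySem.Str.lower k) = true)
    (hD : ¬ ["domain", "host", "url"].any (fun dk => PySem.Str.isIn dk (PySem.Str.lower k)) = true) :
    pvPrio k = 2 := by
  simp only [List.any_cons, List.any_nil, Bool.or_false, Bool.or_eq_true, not_or] at hD
  unfold pvPrio
  rw [if_neg hT, if_neg]
  intro hcontra
  rcases Bool.or_eq_true_iff.mp hcontra with hrest | h
  · rcases Bool.or_eq_true_iff.mp hrest with h | h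
    · exact hD.1 h
    · exact hD.2.1 h
  · exact hD.2.2 h

-- A's bucket loop: with pairwise-distinct keys, each dict collects the labels of its
-- priority class in input order.
theorem pvBuckets (ls : List (String × String)) :
    ∀ (t d o : PySem.Dict String String),
    (ls.map Prod.fst).Nodup →
    (∀ k ∈ ls.map Prod.fst, t.contains k = false ∧ d.contains k = false ∧ o.contains k = false) →
    ls.foldl
      (fun (s : PySem.Dict String String × PySem.Dict String String × PySem.Dict String String) kv =>
        if PySem.Str.isIn "traefik" (PySem.Str.lower kv.1) then
          (s.1.insert kv.1 kv.2, s.2.1, s.2.2)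
        else if ["domain", "host", "url"].any (fun dk => PySem.Str.isIn dk (PySem.Str.lower kv.1)) then
          (s.1, s.2.1.insert kv.1 kv.2, s.2.2)
        else
          (s.1, s.2.1, s.2.2.insert kv.1 kv.2)) (t, d, o) =
      (PySem.Dict.mk (t.items ++ ls.filter (fun kv => decide (pvPrio kv.1 = 0))),
       PySem.Dict.mk (d.items ++ ls.filter (fun kv => decide (pvPrio kv.1 = 1))),
       PySem.Dict.mk (o.items ++ ls.filter (fun kv => decide (pvPrio kv.1 = 2)))) := by
  induction ls with
  | nil =>
      intro t d o _ _
      refine Prod.ext ?_ (Prod.ext ?_ ?_) <;> apply PySem.Dict.ext <;> simp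
  | cons kv tl ih =>
      intro t d o hnd hf
      have hk : kv.1 ∈ (kv :: tl).map Prod.fst := by simp
      obtain ⟨hkt, hkd, hko⟩ := hf kv.1 hk
      rw [List.map_cons] at hnd
      have hnd2 := List.nodup_cons.mp hnd
      have hnd' : (tl.map Prod.fst).Nodup := hnd2.2
      have hne : ∀ k ∈ tl.map Prod.fst, (k == kv.1) = false := by
        intro k hkmem
        simp only [beq_eq_false_iff_ne, ne_eq]
        intro hEq; exact hnd2.1 (hEq ▸ hkmem)
      by_cases hT : PySem.Str.isIn "traefik" (PySem.Str.lower kv.1) = true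
      · have hp : pvPrio kv.1 = 0 := pvPrio_zero_of kv.1 hT
        have hins : t.insert kv.1 kv.2 = PySem.Dict.mk (t.items ++ [kv]) := by
          apply PySem.Dict.ext
          simpa using PySem.Dict.items_insert_of_not_contains (d := t) (k := kv.1) (v := kv.2) hkt
        have hf' : ∀ k ∈ tl.map Prod.fst,
            (t.insert kv.1 kv.2).contains k = false ∧ d.contains k = false ∧ o.contains k = false := by
          intro k hkmem
          obtain ⟨h1, h2, h3⟩ := hf k (by simp [hkmem])
          refine ⟨?_, h2, h3⟩
          rw [PySem.Dict.contains_insert]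
          simp [hne k hkmem, h1]
        rw [List.foldl_cons]
        simp only [hT, if_true]
        rw [ih (t.insert kv.1 kv.2) d o hnd' hf', hins]
        simp [List.filter_cons, hp, List.append_assoc]
      · by_cases hD : ["domain", "host", "url"].any (fun dk => PySem.Str.isIn dk (PySem.Str.lower kv.1)) = true
        · have hp : pvPrio kv.1 = 1 := pvPrio_one_of kv.1 hT hD
          have hins : d.insert kv.1 kv.2 = PySem.Dict.mk (d.items ++ [kv]) := by
            apply PySem.Dict.ext
            simpa using PySem.Dict.items_insert_of_not_contains (d := d) (k := kv.1) (v := kv.2) hkd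
          have hf' : ∀ k ∈ tl.map Prod.fst,
              t.contains k = false ∧ (d.insert kv.1 kv.2).contains k = false ∧ o.contains k = false := by
            intro k hkmem
            obtain ⟨h1, h2, h3⟩ := hf k (by simp [hkmem])
            refine ⟨h1, ?_, h3⟩
            rw [PySem.Dict.contains_insert]
            simp [hne k hkmem, h2]
          rw [List.foldl_cons]
          simp only [hT, hD, if_true, if_false, Bool.false_eq_true]
          rw [ih t (d.insert kv.1 kv.2) o hnd' hf', hins]
          simp [List.filter_cons, hp, List.append_assoc]
        · have hp : pvPrio kv.1 = 2 := pvPrio_two_of kv.1 hT hD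
          have hins : o.insert kv.1 kv.2 = PySem.Dict.mk (o.items ++ [kv]) := by
            apply PySem.Dict.ext
            simpa using PySem.Dict.items_insert_of_not_contains (d := o) (k := kv.1) (v := kv.2) hko
          have hf' : ∀ k ∈ tl.map Prod.fst,
              t.contains k = false ∧ d.contains k = false ∧ (o.insert kv.1 kv.2).contains k = false := by
            intro k hkmem
            obtain ⟨h1, h2, h3⟩ := hf k (by simp [hkmem])
            refine ⟨h1, h2, ?_⟩
            rw [PySem.Dict.contains_insert]
            simp [hne k hkmem, h3]
          rw [List.foldl_cons]
          simp only [hT, hD, if_false, Bool.false_eq_true]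
          rw [ih t d (o.insert kv.1 kv.2) hnd' hf', hins]
          simp [List.filter_cons, hp, List.append_assoc]

theorem pvBucketsEmpty (ls : List (String × String)) (hnd : (ls.map Prod.fst).Nodup) :
    ls.foldl
      (fun (s : PySem.Dict String String × PySem.Dict String String × PySem.Dict String String) kv =>
        if PySem.Str.isIn "traefik" (PySem.Str.lower kv.1) then
          (s.1.insert kv.1 kv.2, s.2.1, s.2.2)
        else if ["domain", "host", "url"].any (fun dk => PySem.Str.isIn dk (PySem.Str.lower kv.1)) then
          (s.1, s.2.1.insert kv.1 kv.2, s.2.2)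
        else
          (s.1, s.2.1, s.2.2.insert kv.1 kv.2))
      (PySem.Dict.empty, PySem.Dict.empty, PySem.Dict.empty) =
      (PySem.Dict.mk (ls.filter (fun kv => decide (pvPrio kv.1 = 0))),
       PySem.Dict.mk (ls.filter (fun kv => decide (pvPrio kv.1 = 1))),
       PySem.Dict.mk (ls.filter (fun kv => decide (pvPrio kv.1 = 2)))) := by
  rw [pvBuckets ls PySem.Dict.empty PySem.Dict.empty PySem.Dict.empty hnd
    (by intro k _; exact ⟨PySem.Dict.contains_empty k, PySem.Dict.contains_empty k, PySem.Dict.contains_empty k⟩)]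
  have he : (PySem.Dict.empty : PySem.Dict String String).items = [] := rfl
  rw [he]
  simp

-- an output-appending loop concatenates the lines
theorem pvFoldLine (indent : String) (xs : List (String × String)) (s : String) :
    xs.foldl (fun out kv => out ++ pvFmtLine indent kv.1 kv.2) s = s ++ pvLines indent xs := by
  induction xs generalizing s with
  | nil => simp [pvLines]
  | cons kv t ih => simp [pvLines, ih, String.append_assoc]

-- A's enumerate loop emits exactly the first (5 - n) entries
theorem pvFoldEnum (indent : String) (xs : List (String × String)) (s : String) (n : Int)
    (hn : 0 ≤ n) :
    (PySem.List.enumerate xs n).foldl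
      (fun out ikv => if ikv.1 < 5 then out ++ pvFmtLine indent ikv.2.1 ikv.2.2 else out) s
      = s ++ pvLines indent (xs.take (5 - n).toNat) := by
  induction xs generalizing s n with
  | nil => simp [pvLines]
  | cons kv t ih =>
      rw [PySem.List.enumerate_cons, List.foldl_cons]
      by_cases h5 : n < 5
      · have hcnt : (5 - n).toNat = (5 - (n + 1)).toNat + 1 := by omega
        rw [hcnt]
        simp only [h5, if_true]
        rw [ih (s ++ pvFmtLine indent kv.1 kv.2) (n + 1) (by omega)]
        simp [pvLines, String.append_assoc]
      · have h0 : (5 - n).toNat = 0 := by omega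
        have h0' : (5 - (n + 1)).toNat = 0 := by omega
        rw [h0]
        simp only [h5, if_false]
        rw [ih s (n + 1) (by omega), h0']
        simp

-- B's emit loop over priority-0/1 entries: unconditional append, counter untouched
theorem pvFoldBNon2 (indent : String) (xs : List (String × String)) (s : String × Int)
    (h : ∀ kv ∈ xs, pvPrio kv.1 ≠ 2) :
    xs.foldl
      (fun (s : String × Int) kv =>
        if pvPrio kv.1 = 2 then
          if s.2 < 5 then (s.1 ++ pvFmtLine indent kv.1 kv.2, s.2 + 1) else s
        else (s.1 ++ pvFmtLine indent kv.1 kv.2, s.2)) s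
      = (s.1 ++ pvLines indent xs, s.2) := by
  induction xs generalizing s with
  | nil => simp [pvLines]
  | cons kv t ih =>
      rw [List.foldl_cons]
      simp only [h kv (by simp), if_false]
      rw [ih _ (fun x hx => h x (by simp [hx]))]
      simp [pvLines, String.append_assoc]

-- B's emit loop over priority-2 entries: shows entries while the counter is below 5
theorem pvFoldB2 (indent : String) (xs : List (String × String)) (s : String) (c : Int)
    (hc : 0 ≤ c) (h : ∀ kv ∈ xs, pvPrio kv.1 = 2) :
    (xs.foldl
      (fun (s : String × Int) kv =>
        if pvPrio kv.1 = 2 then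
          if s.2 < 5 then (s.1 ++ pvFmtLine indent kv.1 kv.2, s.2 + 1) else s
        else (s.1 ++ pvFmtLine indent kv.1 kv.2, s.2)) (s, c)).1
      = s ++ pvLines indent (xs.take (5 - c).toNat) := by
  induction xs generalizing s c with
  | nil => simp [pvLines]
  | cons kv t ih =>
      rw [List.foldl_cons]
      simp only [h kv (by simp), if_true]
      by_cases h5 : c < 5
      · have hcnt : (5 - c).toNat = (5 - (c + 1)).toNat + 1 := by omega
        rw [hcnt]
        simp only [h5, if_true]
        rw [ih (s ++ pvFmtLine indent kv.1 kv.2) (c + 1) (by omega) (fun x hx => h x (by simp [hx]))]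
        simp [pvLines, String.append_assoc]
      · have h0 : (5 - c).toNat = 0 := by omega
        have h0' : (5 - (c + 1)).toNat = 0 := by omega
        rw [h0]
        simp only [h5, if_false]
        rw [ih s c hc (fun x hx => h x (by simp [hx])), h0]
        simp

-- B's counting loop counts the priority-2 labels
theorem pvCount (ls : List (String × String)) (n : Int) :
    ls.foldl (fun n kv => if pvPrio kv.1 = 2 then n + 1 else n) n
      = n + ((ls.filter (fun kv => decide (pvPrio kv.1 = 2))).length : Int) := by
  induction ls generalizing n with
  | nil => simp
  | cons kv t ih =>
      rw [List.foldl_cons]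
      by_cases hp : pvPrio kv.1 = 2
      · simp only [hp, if_true, List.filter_cons]
        rw [ih]
        simp [hp]
        omega
      · simp only [hp, if_false, List.filter_cons]
        rw [ih]
        simp [hp]

-- insertBy walks past a block it does not go before
theorem pvInsertBySkip {α : Type} (bf : α → α → Bool) (x : α) :
    ∀ (u v : List α), (∀ y ∈ u, bf x y = false) →
    PySem.List.insertBy bf x (u ++ v) = u ++ PySem.List.insertBy bf x v := by
  intro u
  induction u with
  | nil => intro v _; simp
  | cons y t ih =>
      intro v h
      simp only [List.cons_append, PySem.List.insertBy, h y (by simp), Bool.false_eq_true, if_false]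
      rw [ih v (fun z hz => h z (by simp [hz]))]

theorem pvInsertByFront {α : Type} (bf : α → α → Bool) (x : α) :
    ∀ (v : List α), (∀ y ∈ v, bf x y = true) →
    PySem.List.insertBy bf x v = x :: v := by
  intro v h
  cases v with
  | nil => simp [PySem.List.insertBy]
  | cons y t => simp [PySem.List.insertBy, h y (by simp)]

-- the stable insertion sort by priority produces the three filter blocks in order
theorem pvSorted3 (ls : List (String × String)) :
    ∀ (b0 b1 b2 : List (String × String)),
    (∀ kv ∈ b0, pvPrio kv.1 = 0) → (∀ kv ∈ b1, pvPrio kv.1 = 1) → (∀ kv ∈ b2, pvPrio kv.1 = 2) →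
    ls.foldl
      (fun acc x => PySem.List.insertBy (fun a b => decide (pvPrio a.1 < pvPrio b.1)) x acc)
      (b0 ++ b1 ++ b2)
      = (b0 ++ ls.filter (fun kv => decide (pvPrio kv.1 = 0)))
        ++ (b1 ++ ls.filter (fun kv => decide (pvPrio kv.1 = 1)))
        ++ (b2 ++ ls.filter (fun kv => decide (pvPrio kv.1 = 2))) := by
  induction ls with
  | nil => intro b0 b1 b2 _ _ _; simp
  | cons x t ih =>
      intro b0 b1 b2 hb0 hb1 hb2
      rw [List.foldl_cons]
      rcases pvPrio_cases x.1 with hp | hp | hp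
      · have hstep : PySem.List.insertBy (fun a b => decide (pvPrio a.1 < pvPrio b.1)) x
            (b0 ++ b1 ++ b2) = (b0 ++ [x]) ++ b1 ++ b2 := by
          rw [List.append_assoc]
          rw [pvInsertBySkip _ x b0 (b1 ++ b2)
            (fun y hy => by simp [hp, hb0 y hy])]
          rw [pvInsertByFront _ x (b1 ++ b2) (fun y hy => by
            rcases List.mem_append.mp hy with h | h
            · simp [hp, hb1 y h]
            · simp [hp, hb2 y h])]
          simp
        rw [hstep]
        rw [ih (b0 ++ [x]) b1 b2
          (fun y hy => by rcases List.mem_append.mp hy with h | h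
                          · exact hb0 y h
                          · simp at h; subst h; exact hp)
          hb1 hb2]
        simp [List.filter_cons, hp, List.append_assoc]
      · have hstep : PySem.List.insertBy (fun a b => decide (pvPrio a.1 < pvPrio b.1)) x
            (b0 ++ b1 ++ b2) = b0 ++ (b1 ++ [x]) ++ b2 := by
          rw [List.append_assoc, List.append_assoc]
          rw [pvInsertBySkip _ x b0 (b1 ++ b2)
            (fun y hy => by simp [hp, hb0 y hy])]
          rw [pvInsertBySkip _ x b1 b2
            (fun y hy => by simp [hp, hb1 y hy])]
          rw [pvInsertByFront _ x b2 (fun y hy => by simp [hp, hb2 y hy])]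
          try simp
        rw [hstep]
        rw [ih b0 (b1 ++ [x]) b2 hb0
          (fun y hy => by rcases List.mem_append.mp hy with h | h
                          · exact hb1 y h
                          · simp at h; subst h; exact hp)
          hb2]
        simp [List.filter_cons, hp, List.append_assoc]
      · have hstep : PySem.List.insertBy (fun a b => decide (pvPrio a.1 < pvPrio b.1)) x
            (b0 ++ b1 ++ b2) = b0 ++ b1 ++ (b2 ++ [x]) := by
          rw [List.append_assoc, List.append_assoc]
          rw [pvInsertBySkip _ x b0 (b1 ++ b2)
            (fun y hy => by simp [hp, hb0 y hy])]
          rw [pvInsertBySkip _ x b1 b2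
            (fun y hy => by simp [hp, hb1 y hy])]
          have h2 : PySem.List.insertBy (fun a b => decide (pvPrio a.1 < pvPrio b.1)) x b2
              = b2 ++ [x] := by
            have := pvInsertBySkip (fun a b => decide (pvPrio a.1 < pvPrio b.1)) x b2 []
              (fun y hy => by simp [hp, hb2 y hy])
            simpa [PySem.List.insertBy] using this
          rw [h2]
          try simp [List.append_assoc]
        rw [hstep]
        rw [ih b0 b1 (b2 ++ [x]) hb0 hb1
          (fun y hy => by rcases List.mem_append.mp hy with h | h
                          · exact hb2 y h
                          · simp at h; subst h; exact hp)]
        simp [List.filter_cons, hp, List.append_assoc]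

theorem pvSortedFilters (ls : List (String × String)) :
    PySem.List.sorted ls (fun kv => pvPrio kv.1) false
      = ls.filter (fun kv => decide (pvPrio kv.1 = 0))
        ++ ls.filter (fun kv => decide (pvPrio kv.1 = 1))
        ++ ls.filter (fun kv => decide (pvPrio kv.1 = 2)) := by
  rw [PySem.List.sorted_eq_foldl_insertBy]
  have h := pvSorted3 ls [] [] [] (by simp) (by simp) (by simp)
  simpa using h

-- ===== VERDICT (by name: the statement is the Claim_ definition above) =====
theorem format_labels_output_spec : Claim_equal_format_labels_output := by
  intro labels indent _hdom hpre
  unfold Spec_format_labels_output format_labels_output format_labels_output_alt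
  by_cases h : labels = []
  · simp [h]
  · simp only [if_neg h]
    rw [pvBucketsEmpty labels hpre]
    dsimp only
    rw [pvFoldLine, pvFoldLine]
    rw [pvFoldEnum indent _ _ 0 (by norm_num)]
    rw [pvSortedFilters labels, pvCount labels 0]
    rw [List.foldl_append]
    have h01 : ∀ kv ∈ labels.filter (fun kv => decide (pvPrio kv.1 = 0))
        ++ labels.filter (fun kv => decide (pvPrio kv.1 = 1)), pvPrio kv.1 ≠ 2 := by
      intro kv hkv
      rcases List.mem_append.mp hkv with hk | hk
      · have := (List.mem_filter.mp hk).2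
        simp at this
        omega
      · have := (List.mem_filter.mp hk).2
        simp at this
        omega
    rw [pvFoldBNon2 indent
      (labels.filter (fun kv => decide (pvPrio kv.1 = 0))
        ++ labels.filter (fun kv => decide (pvPrio kv.1 = 1)))
      (indent ++ "Labels:\n", 0) h01]
    dsimp only
    rw [pvFoldB2 indent (labels.filter (fun kv => decide (pvPrio kv.1 = 2))) _ 0 (by norm_num) (by
      intro kv hkv
      have := (List.mem_filter.mp hkv).2
      simpa using this)]
    rw [pvLines_append]
    have h50 : ((5 : Int) - 0).toNat = 5 := by decide
    rw [h50]
    simp only [zero_add]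
    have hsz : (PySem.Dict.mk (labels.filter (fun kv => decide (pvPrio kv.1 = 2)))).size
        = (labels.filter (fun kv => decide (pvPrio kv.1 = 2))).length := rfl
    rw [hsz]
    split_ifs with h1
    · simp [String.append_assoc]
    · simp [String.append_assoc]
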